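-- pv_equiv track=rewrite | github.com/whitelightning450/Intro-to-MachineLearning | utils/getLandSat.py | month_centers
-- ===== SOURCE A (Python) =====
-- def month_centers(start_year=1985, end_year=2025):
--     """
--     Yield the first day of each month as YYYY-MM-01.
--     """
--     y = start_year
--     m = 1
--
--     while y <= end_year:
--         yield f"{y}-{m:02d}-01"
--
--         if m == 12:
--             y += 1
--             m = 1
--         else:
--             m += 1
-- ===== SOURCE B (Python) =====
-- def month_centers(start_year=1985, end_year=2025):
--     """
--     Yield the first day of each month as YYYY-MM-01.
--     """
--     total = (end_year - start_year + 1) * 12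
--     for i in range(total):
--         y, m = divmod(i, 12)
--         yield f"{start_year + y}-{m + 1:02d}-01"
-- ===== Notes on version B (the rewrite author's own statement) =====
-- stated objective: simpler
-- what changed: Replaced the stateful while-loop with a month counter and carry branch (if m == 12) by a single index-driven for-loop over the total month count, recovering year and month from the index with divmod.
import Mathlib
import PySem

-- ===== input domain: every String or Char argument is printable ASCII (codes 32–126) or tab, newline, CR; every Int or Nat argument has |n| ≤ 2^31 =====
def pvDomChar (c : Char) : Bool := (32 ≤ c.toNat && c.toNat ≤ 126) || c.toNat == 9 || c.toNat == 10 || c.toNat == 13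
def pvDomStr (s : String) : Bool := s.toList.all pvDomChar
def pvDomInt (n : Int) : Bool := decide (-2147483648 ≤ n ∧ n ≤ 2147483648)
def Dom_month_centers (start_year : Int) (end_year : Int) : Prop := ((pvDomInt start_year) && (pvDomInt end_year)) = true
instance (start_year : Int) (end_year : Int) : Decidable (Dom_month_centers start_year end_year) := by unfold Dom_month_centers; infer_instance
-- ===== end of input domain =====

-- B replaces A's stateful month counter with its carry branch by one index-driven
-- loop using divmod arithmetic (objective: simpler).

-- ===== PORT A =====
-- the f-string f"{y}-{m:02d}-01" (m is always 1..12 here, so %02d is a single leading-zero pad)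
def pyFmt02 (y m : Int) : String :=
  PySem.Int.toStr y ++ "-" ++ (if m < 10 then "0" ++ PySem.Int.toStr m else PySem.Int.toStr m) ++ "-01"

-- the while-loop of A, made total with a fuel guard (fuel strictly exceeds the number of iterations)
def month_centers_go (fuel : Nat) (end_year y m : Int) : List String :=
  match fuel with
  | 0 => []
  | fuel + 1 =>
    if y ≤ end_year then
      pyFmt02 y m ::
        (if m = 12 then month_centers_go fuel end_year (y + 1) 1
         else month_centers_go fuel end_year y (m + 1))
    else []

def month_centers (start_year : Int) (end_year : Int) : List String :=
  month_centers_go (((end_year - start_year + 1) * 12).toNat + 1) end_year start_year 1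

-- ===== PORT B =====
def month_centers_alt (start_year : Int) (end_year : Int) : List String :=
  (PySem.List.pyRange 0 ((end_year - start_year + 1) * 12) 1).map
    (fun i => pyFmt02 (start_year + PySem.Int.floordiv i 12) (PySem.Int.mod i 12 + 1))

-- ===== PRECONDITION & SPEC =====
def Spec_month_centers (start_year : Int) (end_year : Int) (out : List String) : Prop := out = month_centers_alt start_year end_year
instance (start_year : Int) (end_year : Int) (out : List String) : Decidable (Spec_month_centers start_year end_year out) := by unfold Spec_month_centers; infer_instance

-- ===== CLAIM (what is proved, stated in full; the proofs are below) =====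
def Claim_equal_month_centers : Prop := ∀ (start_year : Int) (end_year : Int), Dom_month_centers start_year end_year → Spec_month_centers start_year end_year (month_centers start_year end_year)

-- ===== LEMMAS AND PROOFS =====

-- A's loop from state (y, m), 1 ≤ m ≤ 12, produces the months indexed (m-1), m, … counted from year y.
theorem month_centers_go_eq (fuel : Nat) (E : Int) :
    ∀ (y m : Int), 1 ≤ m → m ≤ 12 →
    ((E + 1 - y) * 12 - (m - 1)).toNat ≤ fuel →
    month_centers_go fuel E y m =
      (List.range ((E + 1 - y) * 12 - (m - 1)).toNat).map
        (fun k => pyFmt02 (y + (((m - 1).toNat + k) / 12 : Nat)) ((((m - 1).toNat + k) % 12 : Nat) + 1)) := by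
  induction fuel with
  | zero =>
    intro y m h1 h2 hf
    have : ((E + 1 - y) * 12 - (m - 1)).toNat = 0 := Nat.le_zero.mp hf
    simp [month_centers_go, this]
  | succ fuel ih =>
    intro y m h1 h2 hf
    by_cases hy : y ≤ E
    · have hN : ((E + 1 - y) * 12 - (m - 1)).toNat =
          (((E + 1 - y) * 12 - (m - 1)).toNat - 1) + 1 := by omega
      rw [hN, List.range_succ_eq_map]
      simp only [month_centers_go, if_pos hy, List.map_cons, List.map_map]
      congr 1
      · -- head element equals pyFmt02 y m
        have ha : y + (((m - 1).toNat + 0) / 12 : Nat) = y := by omega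
        have hb : ((((m - 1).toNat + 0) % 12 : Nat) : Int) + 1 = m := by omega
        rw [ha, hb]
      · by_cases hm12 : m = 12
        · subst hm12
          rw [if_pos rfl, ih (y + 1) 1 (by omega) (by omega) (by omega)]
          rw [show ((E + 1 - (y + 1)) * 12 - (1 - 1)).toNat =
              ((E + 1 - y) * 12 - (12 - 1)).toNat - 1 by omega]
          apply List.map_congr_left
          intro k _
          simp only [Function.comp, Nat.succ_eq_add_one]
          have ha : y + 1 + (((1 - 1 : Int).toNat + k) / 12 : Nat)
              = y + ((((12 - 1 : Int).toNat + (k + 1)) / 12 : Nat)) := by omega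
          have hb : ((((1 - 1 : Int).toNat + k) % 12 : Nat) : Int) + 1
              = ((((12 - 1 : Int).toNat + (k + 1)) % 12 : Nat) : Int) + 1 := by omega
          rw [ha, hb]
        · rw [if_neg hm12, ih y (m + 1) (by omega) (by omega) (by omega)]
          rw [show ((E + 1 - y) * 12 - (m + 1 - 1)).toNat =
              ((E + 1 - y) * 12 - (m - 1)).toNat - 1 by omega]
          apply List.map_congr_left
          intro k _
          simp only [Function.comp, Nat.succ_eq_add_one]
          have ha : y + (((m + 1 - 1).toNat + k) / 12 : Nat)
              = y + ((((m - 1).toNat + (k + 1)) / 12 : Nat)) := by omega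
          have hb : ((((m + 1 - 1).toNat + k) % 12 : Nat) : Int) + 1
              = ((((m - 1).toNat + (k + 1)) % 12 : Nat) : Int) + 1 := by omega
          rw [ha, hb]
    · have hN : ((E + 1 - y) * 12 - (m - 1)).toNat = 0 := by omega
      simp [month_centers_go, hy, hN]

-- ===== VERDICT (by name: the statement is the Claim_ definition above) =====
theorem month_centers_spec : Claim_equal_month_centers := by
  intro s E _
  unfold Spec_month_centers month_centers month_centers_alt
  rw [month_centers_go_eq _ E s 1 (by omega) (by omega) (by omega)]
  rw [PySem.List.pyRange_one]
  rw [show ((E + 1 - s) * 12 - (1 - 1)).toNat = ((E - s + 1) * 12 - 0).toNat by omega,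
      List.map_map]
  apply List.map_congr_left
  intro k hk
  simp only [Function.comp]
  rw [show (0 : Int) + (k : Int) = (k : Int) by omega]
  rw [show PySem.Int.floordiv (k : Int) 12 = ((k / 12 : Nat) : Int) from
        by exact_mod_cast PySem.Int.floordiv_natCast k 12,
      show PySem.Int.mod (k : Int) 12 = ((k % 12 : Nat) : Int) from
        by exact_mod_cast PySem.Int.mod_natCast k 12]
  have ha : s + ((k / 12 : Nat) : Int) = s + (((1 - 1 : Int).toNat + k) / 12 : Nat) := by omega
  have hb : ((k % 12 : Nat) : Int) + 1 = ((((1 - 1 : Int).toNat + k) % 12 : Nat) : Int) + 1 := by omega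
  rw [ha, hb]
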